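-- pv_equiv track=rewrite | github.com/equinor/neqsim | neqsim-paperlab/tools/book_index.py | render_index_md
-- ===== SOURCE A (Python) =====
-- def render_index_md(idx: dict[str, dict[str | None, list[int]]]) -> str:
--     if not idx:
--         return "# Index\n\n*(no entries)*\n"
--     lines = ["# Index", ""]
--     last_letter = ""
--     for primary in sorted(idx.keys(), key=str.lower):
--         first = primary[:1].upper()
--         if first != last_letter:
--             lines.append(f"\n## {first}\n")
--             last_letter = first
--         subs = idx[primary]
--         # primary line: chapters where the primary is the only entry
--         main_chs = subs.get(None, [])
--         if main_chs:
--             locs = ", ".join(str(c) for c in sorted(main_chs))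
--             lines.append(f"- **{primary}**, ch. {locs}")
--         else:
--             lines.append(f"- **{primary}**")
--         for sub in sorted([s for s in subs if s is not None], key=str.lower):
--             locs = ", ".join(str(c) for c in sorted(subs[sub]))
--             lines.append(f"  - {sub}, ch. {locs}")
--     lines.append("")
--     return "\n".join(lines)
-- ===== SOURCE B (Python) =====
-- def _entry_lines(idx, primary):
--     subs = idx[primary]
--     main_chs = subs.get(None, [])
--     if main_chs:
--         lines = ["- **" + primary + "**, ch. " + ", ".join(map(str, sorted(main_chs)))]
--     else:
--         lines = ["- **" + primary + "**"]
--     for sub in sorted((s for s in subs if s is not None), key=str.lower):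
--         lines.append("  - " + sub + ", ch. " + ", ".join(map(str, sorted(subs[sub]))))
--     return lines
--
--
-- def render_index_md(idx: dict[str, dict[str | None, list[int]]]) -> str:
--     if not idx:
--         return "# Index\n\n*(no entries)*\n"
--     # bucket the primaries by their (uppercased) first letter, then sort letters
--     # and, independently, the primaries inside each bucket
--     buckets = {}
--     for primary in idx:
--         buckets.setdefault(primary[:1].upper(), []).append(primary)
--     lines = ["# Index", ""]
--     for letter in sorted(buckets, key=str.lower):
--         if letter:
--             lines.append(f"\n## {letter}\n")
--         for primary in sorted(buckets[letter], key=str.lower):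
--             lines.extend(_entry_lines(idx, primary))
--     lines.append("")
--     return "\n".join(lines)
-- ===== Notes on version B (the rewrite author's own statement) =====
-- stated objective: alternative
-- what changed: B never sorts all primaries in one global pass with a last_letter state variable: it first groups the primaries into per-letter buckets with one dict pass, then sorts the letters and, independently, each bucket's primaries, emitting one section per bucket (correct because case-insensitive sorting keeps equal uppercased first letters contiguous and ties stay in dict insertion order in both schemes).
import Mathlib
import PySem

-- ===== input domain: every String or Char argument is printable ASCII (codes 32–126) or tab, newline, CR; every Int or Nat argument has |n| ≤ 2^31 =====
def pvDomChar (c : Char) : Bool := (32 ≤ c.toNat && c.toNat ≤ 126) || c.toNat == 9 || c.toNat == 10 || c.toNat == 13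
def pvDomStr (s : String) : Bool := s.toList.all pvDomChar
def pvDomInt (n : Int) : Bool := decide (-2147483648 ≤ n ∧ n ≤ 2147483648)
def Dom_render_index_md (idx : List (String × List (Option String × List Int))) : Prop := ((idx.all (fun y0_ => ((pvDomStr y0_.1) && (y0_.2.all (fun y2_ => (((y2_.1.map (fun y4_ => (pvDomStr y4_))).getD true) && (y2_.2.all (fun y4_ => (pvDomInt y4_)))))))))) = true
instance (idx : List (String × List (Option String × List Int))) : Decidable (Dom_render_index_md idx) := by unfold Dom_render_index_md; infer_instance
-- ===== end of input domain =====

-- B replaces A's single globally sorted traversal with stateful last_letter header tracking by a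
-- two-level bucket scheme: primaries are first grouped into per-letter buckets (a dict built in one
-- pass), then the letters are sorted and each bucket is sorted independently; objective: alternative.
-- Return values proved equal on all inputs.

-- shared helpers for subexpressions both Pythons share verbatim:
-- primary[:1].upper()  (s[:1] is take 1; exact on ASCII)
def pvLetter (s : String) : String := String.ofList (PySem.Chars.upper (s.toList.take 1))
-- ", ".join(str(c) for c in sorted(chs))
def pvJoinLocs (chs : List Int) : String :=
  PySem.Str.join ", " ((PySem.List.sorted chs (fun c => c) false).map PySem.Int.toStr)

-- ===== PORT A =====
-- the for-loop of A, state = (lines, last_letter); idx[primary] via get?/getD (key always present)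
def pvLoopA (d : PySem.Dict String (List (Option String × List Int))) :
    List String → List String → String → List String
  | [], lines, _ => lines
  | primary :: rest, lines, last =>
    let first := pvLetter primary
    let lines1 := if first ≠ last then lines ++ ["\n## " ++ first ++ "\n"] else lines
    let last1 := if first ≠ last then first else last
    let subs := PySem.Dict.ofList ((d.get? primary).getD [])
    let main_chs := subs.getD none []
    let lines2 := if main_chs ≠ [] then
        lines1 ++ ["- **" ++ primary ++ "**, ch. " ++ pvJoinLocs main_chs]
      else
        lines1 ++ ["- **" ++ primary ++ "**"]
    let lines3 := lines2 ++
      (PySem.List.sorted ((PySem.Dict.keys subs).filterMap (fun o => o)) PySem.Str.lower false).map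
        (fun sub => "  - " ++ sub ++ ", ch. " ++ pvJoinLocs ((subs.get? (some sub)).getD []))
    pvLoopA d rest lines3 last1

def render_index_md (idx : List (String × List (Option String × List Int))) : String :=
  if idx.isEmpty then "# Index\n\n*(no entries)*\n"
  else
    let d := PySem.Dict.ofList idx
    let lines := pvLoopA d (PySem.List.sorted (PySem.Dict.keys d) PySem.Str.lower false) ["# Index", ""] ""
    PySem.Str.join "\n" (lines ++ [""])

-- ===== PORT B =====
-- _entry_lines(idx, primary): the main line plus the sorted sub-entry lines
def pvEntryB (d : PySem.Dict String (List (Option String × List Int))) (primary : String) :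
    List String :=
  let subs := PySem.Dict.ofList ((d.get? primary).getD [])
  let main_chs := subs.getD none []
  (if main_chs ≠ [] then ["- **" ++ primary ++ "**, ch. " ++ pvJoinLocs main_chs]
   else ["- **" ++ primary ++ "**"]) ++
  (PySem.List.sorted ((PySem.Dict.keys subs).filterMap (fun o => o)) PySem.Str.lower false).map
    (fun sub => "  - " ++ sub ++ ", ch. " ++ pvJoinLocs ((subs.get? (some sub)).getD []))

-- buckets: one pass over the dict's keys, grouping by uppercased first letter
-- (buckets.setdefault(letter, []).append(primary) = modify with default [] appending)
def pvBuckets (ks : List String) : PySem.Dict String (List String) :=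
  ks.foldl (fun b p => PySem.Dict.modify b (pvLetter p) [] (fun v => v ++ [p])) PySem.Dict.empty

def render_index_md_alt (idx : List (String × List (Option String × List Int))) : String :=
  if idx.isEmpty then "# Index\n\n*(no entries)*\n"
  else
    let d := PySem.Dict.ofList idx
    let buckets := pvBuckets (PySem.Dict.keys d)
    let lines := (PySem.List.sorted (PySem.Dict.keys buckets) PySem.Str.lower false).foldl
      (fun acc L =>
        (PySem.List.sorted (PySem.Dict.getD buckets L []) PySem.Str.lower false).foldl
          (fun ls p => ls ++ pvEntryB d p)
          (if L ≠ "" then acc ++ ["\n## " ++ L ++ "\n"] else acc))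
      ["# Index", ""]
    PySem.Str.join "\n" (lines ++ [""])

-- ===== PRECONDITION & SPEC =====
def Spec_render_index_md (idx : List (String × List (Option String × List Int))) (out : String) : Prop := out = render_index_md_alt idx
instance (idx : List (String × List (Option String × List Int))) (out : String) : Decidable (Spec_render_index_md idx out) := by unfold Spec_render_index_md; infer_instance

-- ===== CLAIM (what is proved, stated in full; the proofs are below) =====
def Claim_equal_render_index_md : Prop := ∀ (idx : List (String × List (Option String × List Int))), Dom_render_index_md idx → Spec_render_index_md idx (render_index_md idx)

-- ===== LEMMAS AND PROOFS =====

-- ---- character-level facts (ASCII upper/lower) ----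
theorem pvUpperLower (c : Char) :
    PySem.Chars.upperChar (PySem.Chars.lowerChar c) = PySem.Chars.upperChar c := by
  simp only [PySem.Chars.lowerChar, PySem.Chars.upperChar, PySem.Chars.isupper, PySem.Chars.islower]
  by_cases h : ('A' ≤ c ∧ c ≤ 'Z')
  · have hA : 65 ≤ c.toNat := h.1
    have hZ : c.toNat ≤ 90 := h.2
    have ht : (Char.ofNat (c.toNat + 32)).toNat = c.toNat + 32 := by
      rw [Char.toNat_ofNat, if_pos (by left; omega)]
    have hlo : ('a' ≤ Char.ofNat (c.toNat + 32)) := by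
      show (97 : Nat) ≤ (Char.ofNat (c.toNat + 32)).toNat; omega
    have hhi : (Char.ofNat (c.toNat + 32) ≤ 'z') := by
      show (Char.ofNat (c.toNat + 32)).toNat ≤ 122; omega
    have hnl : ¬ ('a' ≤ c) := by
      intro hc; have : 97 ≤ c.toNat := hc; omega
    simp [h.1, h.2, hlo, hhi, hnl, ht, Char.ofNat_toNat]
  · simp [h]

theorem pvLowerUpper (c : Char) :
    PySem.Chars.lowerChar (PySem.Chars.upperChar c) = PySem.Chars.lowerChar c := by
  simp only [PySem.Chars.lowerChar, PySem.Chars.upperChar, PySem.Chars.isupper, PySem.Chars.islower]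
  by_cases h : ('a' ≤ c ∧ c ≤ 'z')
  · have hA : 97 ≤ c.toNat := h.1
    have hZ : c.toNat ≤ 122 := h.2
    have ht : (Char.ofNat (c.toNat - 32)).toNat = c.toNat - 32 := by
      rw [Char.toNat_ofNat, if_pos (by left; omega)]
    have hlo : ('A' ≤ Char.ofNat (c.toNat - 32)) := by
      show (65 : Nat) ≤ (Char.ofNat (c.toNat - 32)).toNat; omega
    have hhi : (Char.ofNat (c.toNat - 32) ≤ 'Z') := by
      show (Char.ofNat (c.toNat - 32)).toNat ≤ 90; omega
    have hnu : ¬ ('A' ≤ c ∧ c ≤ 'Z') := by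
      intro hc; have h1 : 65 ≤ c.toNat := hc.1; have h2 : c.toNat ≤ 90 := hc.2; omega
    have hback : Char.ofNat (c.toNat - 32 + 32) = c := by
      have he : c.toNat - 32 + 32 = c.toNat := by omega
      rw [he, Char.ofNat_toNat]
    simp [h.1, h.2, hlo, hhi, hnu, ht, hback]
  · simp [h]

-- ---- pvLetter and its lowercase key ----
def pvLowKey (s : String) : List Char := PySem.Chars.lower (s.toList.take 1)

theorem pvLow_letter (s : String) : (PySem.Str.lower (pvLetter s)).toList = pvLowKey s := by
  rw [PySem.Str.toList_lower, pvLetter, String.toList_ofList, pvLowKey]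
  simp [PySem.Chars.lower, PySem.Chars.upper, List.map_map, Function.comp_def, pvLowerUpper]

theorem pvLetter_of_lowKey {a b : String} (h : pvLowKey a = pvLowKey b) :
    pvLetter a = pvLetter b := by
  have h2 : PySem.Chars.upper (pvLowKey a) = PySem.Chars.upper (pvLowKey b) := by rw [h]
  simp only [pvLowKey, PySem.Chars.upper, PySem.Chars.lower, List.map_map,
    Function.comp_def, pvUpperLower] at h2
  simp only [pvLetter, PySem.Chars.upper]
  rw [h2]

theorem pvLetter_inj_lower {a b : String}
    (h : PySem.Str.lower (pvLetter a) = PySem.Str.lower (pvLetter b)) :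
    pvLetter a = pvLetter b := by
  apply pvLetter_of_lowKey
  rw [← pvLow_letter, ← pvLow_letter, h]

theorem take1_mono {l m : List Char} (h : l ≤ m) : l.take 1 ≤ m.take 1 := by
  by_contra hc
  apply absurd h
  simp only [not_le] at hc ⊢
  cases l with
  | nil => exact absurd hc (by simp [List.not_lt_nil])
  | cons x l' =>
    cases m with
    | nil => exact List.nil_lt_cons x l'
    | cons y m' =>
      simp only [List.take, List.cons_lt_cons_iff] at hc
      rcases hc with hlt | ⟨he, hnil⟩
      · exact List.cons_lt_cons_iff.mpr (Or.inl hlt)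
      · exact absurd hnil (List.not_lt_nil _)

theorem pvLowKey_mono {a b : String} (h : PySem.Str.lower a ≤ PySem.Str.lower b) :
    pvLowKey a ≤ pvLowKey b := by
  rw [String.le_iff_toList_le, PySem.Str.toList_lower, PySem.Str.toList_lower] at h
  have := take1_mono h
  simpa [pvLowKey, PySem.Chars.lower, List.map_take] using this

theorem pvLetterLower_mono {a b : String} (h : PySem.Str.lower a ≤ PySem.Str.lower b) :
    PySem.Str.lower (pvLetter a) ≤ PySem.Str.lower (pvLetter b) := by
  rw [String.le_iff_toList_le, pvLow_letter, pvLow_letter]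
  exact pvLowKey_mono h

theorem pvLetterLower_strict {a b : String} (h : PySem.Str.lower a ≤ PySem.Str.lower b)
    (hne : pvLetter a ≠ pvLetter b) :
    PySem.Str.lower (pvLetter a) < PySem.Str.lower (pvLetter b) :=
  lt_of_le_of_ne (pvLetterLower_mono h) (fun e => hne (pvLetter_inj_lower e))

theorem pvLetter_between {a b c : String} (hab : PySem.Str.lower a ≤ PySem.Str.lower b)
    (hbc : PySem.Str.lower b ≤ PySem.Str.lower c) (hac : pvLetter a = pvLetter c) :
    pvLetter b = pvLetter a := by
  have h1 := pvLowKey_mono hab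
  have h2 := pvLowKey_mono hbc
  have h3 : pvLowKey a = pvLowKey c := by
    rw [← pvLow_letter, ← pvLow_letter, hac]
  exact pvLetter_of_lowKey (le_antisymm (h3 ▸ h2) h1)

theorem pvLetter_eq_empty_iff (s : String) : pvLetter s = "" ↔ s = "" := by
  constructor
  · intro h
    have h2 := congrArg String.toList h
    rw [pvLetter, String.toList_ofList] at h2
    simp [PySem.Chars.upper] at h2
    simpa [String.toList_eq_nil_iff] using h2
  · intro h; subst h; rfl

theorem pvLower_le_empty (s : String) (h : PySem.Str.lower s ≤ PySem.Str.lower "") : s = "" := by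
  have h0 : PySem.Str.lower s ≤ "" := h
  have h1 : PySem.Str.lower s = "" := by
    rcases lt_or_eq_of_le h0 with h' | h'
    · exact absurd h' (by simp)
    · exact h'
  have h2 : (PySem.Str.lower s).toList = [] := by rw [h1]; rfl
  rw [PySem.Str.toList_lower] at h2
  simp [PySem.Chars.lower] at h2
  exact h2

theorem pvDropWhile_head_false {α : Type} (p : α → Bool) :
    ∀ (l : List α) (a : α) (t' : List α), l.dropWhile p = a :: t' → p a = false := by
  intro l
  induction l with
  | nil => intro a t' h; simp at h
  | cons x xs ih =>
    intro a t' h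
    rw [List.dropWhile_cons] at h
    by_cases hp : p x
    · simp [hp] at h; exact ih a t' h
    · simp [hp] at h; rw [← h.1]; simpa using hp

-- ---- the stable sort commutes with filter ----
theorem pvInsertBy_all_before {α : Type} (before : α → α → Bool) (x : α) (l : List α)
    (h : ∀ z ∈ l, before x z = true) : PySem.List.insertBy before x l = x :: l := by
  cases l with
  | nil => rfl
  | cons y ys => simp [PySem.List.insertBy, h y (by simp)]

theorem pvInsertBy_filter {α κ : Type} [LinearOrder κ] (key : α → κ) (p : α → Bool) (x : α)
    (l : List α) (hs : l.Pairwise (fun a b => key a ≤ key b)) :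
    (PySem.List.insertBy (fun a b => decide (key a < key b)) x l).filter p =
      if p x then PySem.List.insertBy (fun a b => decide (key a < key b)) x (l.filter p)
      else l.filter p := by
  induction l with
  | nil => by_cases hp : p x <;> simp [PySem.List.insertBy, hp]
  | cons y ys ih =>
    obtain ⟨hy, hys⟩ := List.pairwise_cons.mp hs
    by_cases hb : key x < key y
    · rw [show PySem.List.insertBy (fun a b => decide (key a < key b)) x (y :: ys) =
          x :: y :: ys by simp [PySem.List.insertBy, hb]]
      by_cases hp : p x
      · rw [List.filter_cons_of_pos hp, if_pos hp]
        rw [pvInsertBy_all_before]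
        intro z hz
        have hz' : z ∈ y :: ys := List.mem_of_mem_filter hz
        have : key y ≤ key z := by
          rcases hz' with _ | hz'
          · exact le_refl _
          · exact hy z (by assumption)
        simp [lt_of_lt_of_le hb this]
      · rw [List.filter_cons_of_neg hp, if_neg hp]
    · rw [show PySem.List.insertBy (fun a b => decide (key a < key b)) x (y :: ys) =
          y :: PySem.List.insertBy (fun a b => decide (key a < key b)) x ys by
            simp [PySem.List.insertBy, hb]]
      by_cases hp : p x
      · rw [if_pos hp]
        by_cases hpy : p y
        · rw [List.filter_cons_of_pos hpy, List.filter_cons_of_pos hpy, ih hys, if_pos hp]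
          rw [show PySem.List.insertBy (fun a b => decide (key a < key b)) x
              (y :: ys.filter p) = y :: PySem.List.insertBy (fun a b => decide (key a < key b)) x
              (ys.filter p) by simp [PySem.List.insertBy, hb]]
        · rw [List.filter_cons_of_neg hpy, List.filter_cons_of_neg hpy, ih hys, if_pos hp]
      · rw [if_neg hp]
        by_cases hpy : p y
        · rw [List.filter_cons_of_pos hpy, List.filter_cons_of_pos hpy, ih hys, if_neg hp]
        · rw [List.filter_cons_of_neg hpy, List.filter_cons_of_neg hpy, ih hys, if_neg hp]

theorem pvFilter_sorted {α κ : Type} [LinearOrder κ] (key : α → κ) (p : α → Bool) (xs : List α) :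
    (PySem.List.sorted xs key false).filter p = PySem.List.sorted (xs.filter p) key false := by
  induction xs using List.reverseRecOn with
  | nil => rfl
  | append_singleton xs x ih =>
    rw [PySem.List.sorted_eq_foldl_insertBy, List.foldl_append, List.foldl_cons, List.foldl_nil,
      ← PySem.List.sorted_eq_foldl_insertBy,
      pvInsertBy_filter key p x _ (PySem.List.sorted_pairwise xs key), ih,
      List.filter_append]
    by_cases hp : p x
    · rw [if_pos hp, List.filter_cons_of_pos hp, List.filter_nil]
      conv_rhs => rw [PySem.List.sorted_eq_foldl_insertBy, List.foldl_append, List.foldl_cons,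
        List.foldl_nil, ← PySem.List.sorted_eq_foldl_insertBy]
    · rw [if_neg hp, List.filter_cons_of_neg hp, List.filter_nil, List.append_nil]

-- ---- runs of equal letters in the sorted key list ----
def pvRuns : List String → List (String × List String)
  | [] => []
  | k :: t =>
    (pvLetter k, k :: t.takeWhile (fun x => pvLetter x == pvLetter k)) ::
      pvRuns (t.dropWhile (fun x => pvLetter x == pvLetter k))
termination_by ks => ks.length
decreasing_by
  have := List.length_dropWhile_le (fun x => pvLetter x == pvLetter k) t
  simp; omega

theorem pvRest_letter_ne (k : String) (t : List String)
    (hpw : (k :: t).Pairwise (fun a b => PySem.Str.lower a ≤ PySem.Str.lower b)) :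
    ∀ z ∈ t.dropWhile (fun x => pvLetter x == pvLetter k), pvLetter z ≠ pvLetter k := by
  intro z hz
  cases hdw : t.dropWhile (fun x => pvLetter x == pvLetter k) with
  | nil => rw [hdw] at hz; simp at hz
  | cons w r' =>
    rw [hdw] at hz
    have hnw : pvLetter w ≠ pvLetter k := by
      have := pvDropWhile_head_false (fun x => pvLetter x == pvLetter k) t w r' hdw
      simpa using this
    have hwt : w ∈ t := (List.dropWhile_sublist _).mem (by rw [hdw]; simp)
    have hkw : PySem.Str.lower k ≤ PySem.Str.lower w := (List.pairwise_cons.mp hpw).1 w hwt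
    rcases List.mem_cons.mp hz with rfl | hz'
    · exact hnw
    · have hpw' : (w :: r').Pairwise (fun a b => PySem.Str.lower a ≤ PySem.Str.lower b) := by
        rw [← hdw]
        exact ((List.pairwise_cons.mp hpw).2).sublist (List.dropWhile_sublist _)
      have hwz : PySem.Str.lower w ≤ PySem.Str.lower z := (List.pairwise_cons.mp hpw').1 z hz'
      intro hzk
      exact hnw (pvLetter_between hkw hwz hzk.symm)

theorem pvUpdate_all_eq {x : String} : ∀ (l : List String), (∀ y ∈ l, y = x) →
    PySem.Set.update [x] l = [x] := by
  intro l
  induction l with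
  | nil => intro _; rfl
  | cons y ys ih =>
    intro h
    have : y = x := h y (by simp)
    subst this
    rw [show PySem.Set.update [y] (y :: ys) = PySem.Set.update (PySem.Set.add [y] y) ys from rfl]
    rw [show PySem.Set.add [y] y = [y] by simp [PySem.Set.add]]
    exact ih (fun z hz => h z (by simp [hz]))

theorem pvDedup_letters (k : String) (t : List String)
    (hpw : (k :: t).Pairwise (fun a b => PySem.Str.lower a ≤ PySem.Str.lower b)) :
    PySem.List.dedup (((k :: t).map pvLetter)) =
      pvLetter k ::
        PySem.List.dedup ((t.dropWhile (fun x => pvLetter x == pvLetter k)).map pvLetter) := by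
  have hsplit : t = t.takeWhile (fun x => pvLetter x == pvLetter k) ++
      t.dropWhile (fun x => pvLetter x == pvLetter k) := (List.takeWhile_append_dropWhile).symm
  set tw := t.takeWhile (fun x => pvLetter x == pvLetter k) with htw
  set rest := t.dropWhile (fun x => pvLetter x == pvLetter k) with hrest
  have h1 : PySem.List.dedup ((k :: t).map pvLetter) =
      PySem.Set.update (PySem.Set.update [pvLetter k] (tw.map pvLetter)) (rest.map pvLetter) := by
    conv_lhs => rw [hsplit]
    simp only [List.map_cons, List.map_append, PySem.List.dedup]
    rw [show PySem.Set.ofList (pvLetter k :: (tw.map pvLetter ++ rest.map pvLetter)) =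
      PySem.Set.update (PySem.Set.add PySem.Set.empty (pvLetter k))
        (tw.map pvLetter ++ rest.map pvLetter) from rfl]
    rw [show PySem.Set.add PySem.Set.empty (pvLetter k) = [pvLetter k] from rfl]
    rw [PySem.Set.update_append]
  rw [h1, pvUpdate_all_eq _ (by
    intro y hy
    obtain ⟨z, hz, rfl⟩ := List.mem_map.mp hy
    simpa using List.mem_takeWhile_imp hz)]
  rw [PySem.Set.update_eq_append_filter]
  have hf : (PySem.Set.ofList (rest.map pvLetter)).filter
      (fun y => !(PySem.Set.contains [pvLetter k] y)) = PySem.Set.ofList (rest.map pvLetter) := by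
    apply List.filter_eq_self.mpr
    intro y hy
    have hy' : y ∈ rest.map pvLetter := (PySem.Set.mem_ofList _ _).mp hy
    obtain ⟨z, hz, rfl⟩ := List.mem_map.mp hy'
    have := pvRest_letter_ne k t hpw z hz
    simp [PySem.Set.contains, this]
  rw [hf]
  rfl

theorem pvRuns_eq : ∀ (n : Nat) (S : List String), S.length ≤ n →
    S.Pairwise (fun a b => PySem.Str.lower a ≤ PySem.Str.lower b) →
    pvRuns S = (PySem.List.dedup (S.map pvLetter)).map
      (fun L => (L, S.filter (fun p => pvLetter p == L))) := by
  intro n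
  induction n with
  | zero =>
    intro S hlen _
    have : S = [] := List.eq_nil_of_length_eq_zero (Nat.le_zero.mp hlen)
    subst this; rw [pvRuns]; rfl
  | succ m ih =>
    intro S hlen hpw
    cases S with
    | nil => rw [pvRuns]; rfl
    | cons k t =>
      have hsplit : t = t.takeWhile (fun x => pvLetter x == pvLetter k) ++
          t.dropWhile (fun x => pvLetter x == pvLetter k) := (List.takeWhile_append_dropWhile).symm
      have htw : ∀ x ∈ t.takeWhile (fun x => pvLetter x == pvLetter k), pvLetter x = pvLetter k :=
        fun x hx => by simpa using List.mem_takeWhile_imp hx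
      have hrest := pvRest_letter_ne k t hpw
      rw [pvDedup_letters k t hpw, List.map_cons]
      have hfilt_k : (k :: t).filter (fun p => pvLetter p == pvLetter k) =
          k :: t.takeWhile (fun x => pvLetter x == pvLetter k) := by
        rw [List.filter_cons_of_pos (by simp)]
        congr 1
        conv_lhs => rw [hsplit]
        rw [List.filter_append, List.filter_eq_self.mpr (fun x hx => by simp [htw x hx]),
          List.filter_eq_nil_iff.mpr (fun z hz => by simp [hrest z hz]), List.append_nil]
      have hdrop_len : (t.dropWhile (fun x => pvLetter x == pvLetter k)).length ≤ m := by
        have := (List.dropWhile_sublist (fun x => pvLetter x == pvLetter k) (l := t)).length_le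
        simp at hlen; omega
      have hpw' : (t.dropWhile (fun x => pvLetter x == pvLetter k)).Pairwise
          (fun a b => PySem.Str.lower a ≤ PySem.Str.lower b) :=
        (List.pairwise_cons.mp hpw).2.sublist (List.dropWhile_sublist _)
      rw [pvRuns, hfilt_k.symm, ih _ hdrop_len hpw']
      congr 1
      apply List.map_congr_left
      intro L hL
      have hL' : L ∈ (t.dropWhile (fun x => pvLetter x == pvLetter k)).map pvLetter :=
        (PySem.Set.mem_ofList _ _).mp hL
      obtain ⟨z, hz, rfl⟩ := List.mem_map.mp hL'
      have hLk : pvLetter z ≠ pvLetter k := hrest z hz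
      have hfilt_L : (k :: t).filter (fun p => pvLetter p == pvLetter z) =
          (t.dropWhile (fun x => pvLetter x == pvLetter k)).filter
            (fun p => pvLetter p == pvLetter z) := by
        rw [List.filter_cons_of_neg (by simp only [beq_iff_eq]; exact Ne.symm hLk)]
        conv_lhs => rw [hsplit]
        rw [List.filter_append,
          List.filter_eq_nil_iff.mpr (fun x hx => by
            simp only [beq_iff_eq, htw x hx]; simpa using Ne.symm hLk),
          List.nil_append]
      rw [hfilt_L]

theorem pvDedup_letters_pairwise : ∀ (n : Nat) (S : List String), S.length ≤ n →
    S.Pairwise (fun a b => PySem.Str.lower a ≤ PySem.Str.lower b) →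
    (PySem.List.dedup (S.map pvLetter)).Pairwise
      (fun a b => PySem.Str.lower a < PySem.Str.lower b) := by
  intro n
  induction n with
  | zero =>
    intro S hlen _
    have : S = [] := List.eq_nil_of_length_eq_zero (Nat.le_zero.mp hlen)
    subst this; simp [PySem.List.dedup]
  | succ m ih =>
    intro S hlen hpw
    cases S with
    | nil => simp [PySem.List.dedup]
    | cons k t =>
      rw [pvDedup_letters k t hpw]
      have hdrop_len : (t.dropWhile (fun x => pvLetter x == pvLetter k)).length ≤ m := by
        have := (List.dropWhile_sublist (fun x => pvLetter x == pvLetter k) (l := t)).length_le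
        simp at hlen; omega
      have hpw' : (t.dropWhile (fun x => pvLetter x == pvLetter k)).Pairwise
          (fun a b => PySem.Str.lower a ≤ PySem.Str.lower b) :=
        (List.pairwise_cons.mp hpw).2.sublist (List.dropWhile_sublist _)
      refine List.pairwise_cons.mpr ⟨?_, ih _ hdrop_len hpw'⟩
      intro L hL
      have hL' : L ∈ (t.dropWhile (fun x => pvLetter x == pvLetter k)).map pvLetter :=
        (PySem.Set.mem_ofList _ _).mp hL
      obtain ⟨z, hz, rfl⟩ := List.mem_map.mp hL'
      have hzt : z ∈ t := (List.dropWhile_sublist _).mem hz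
      have hkz : PySem.Str.lower k ≤ PySem.Str.lower z := (List.pairwise_cons.mp hpw).1 z hzt
      exact pvLetterLower_strict hkz (fun h => pvRest_letter_ne k t hpw z hz h.symm)

-- ---- A's loop over one whole letter-run: no headers, just the entries ----
theorem pvLoopA_run (d : PySem.Dict String (List (Option String × List Int))) (f : String) :
    ∀ (tw rest acc : List String), (∀ x ∈ tw, pvLetter x = f) →
      pvLoopA d (tw ++ rest) acc f = pvLoopA d rest (acc ++ tw.flatMap (pvEntryB d)) f := by
  intro tw
  induction tw with
  | nil => intro rest acc _; simp
  | cons x xs ih =>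
    intro rest acc hall
    have hx : pvLetter x = f := hall x (by simp)
    simp only [List.cons_append, pvLoopA, hx, ne_eq, not_true_eq_false, if_false, ite_self]
    rw [ih rest _ (fun y hy => hall y (by simp [hy]))]
    congr 1
    by_cases hm : (PySem.Dict.ofList ((d.get? x).getD [])).getD none [] ≠ []
    · simp [pvEntryB, hm]
    · simp [pvEntryB, hm]

-- render a run list: one header per run (none for the empty letter), then the entries
def pvRenderRuns (d : PySem.Dict String (List (Option String × List Int))) :
    List (String × List String) → List String
  | [] => []
  | (l, g) :: rs =>
    (if l ≠ "" then ["\n## " ++ l ++ "\n"] else []) ++ g.flatMap (pvEntryB d) ++ pvRenderRuns d rs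

-- one letter section: the header (none for the empty letter) then the group's entries
def pvSect (d : PySem.Dict String (List (Option String × List Int))) (r : String × List String) :
    List String :=
  (if r.1 ≠ "" then ["\n## " ++ r.1 ++ "\n"] else []) ++ r.2.flatMap (pvEntryB d)

-- main induction: A's stateful loop = rendering of the letter runs
theorem pvMain (d : PySem.Dict String (List (Option String × List Int))) :
    ∀ (n : Nat) (ks : List String), ks.length ≤ n → ∀ (acc : List String) (last : String),
      ks.Pairwise (fun a b => PySem.Str.lower a ≤ PySem.Str.lower b) →
      (∀ k0 ∈ ks.head?, ((pvLetter k0 ≠ last) ↔ (pvLetter k0 ≠ ""))) →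
      pvLoopA d ks acc last = acc ++ pvRenderRuns d (pvRuns ks) := by
  intro n
  induction n with
  | zero =>
    intro ks hlen acc last _ _
    have : ks = [] := List.eq_nil_of_length_eq_zero (Nat.le_zero.mp hlen)
    subst this; simp [pvLoopA, pvRuns, pvRenderRuns]
  | succ m ih =>
    intro ks hlen acc last hpw hhead
    cases ks with
    | nil => simp [pvLoopA, pvRuns, pvRenderRuns]
    | cons k t =>
      have hiff := hhead k (by simp)
      have hstep : pvLoopA d (k :: t) acc last =
          pvLoopA d t ((acc ++ (if pvLetter k ≠ "" then ["\n## " ++ pvLetter k ++ "\n"] else [])) ++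
            pvEntryB d k) (pvLetter k) := by
        by_cases hk : pvLetter k ≠ last
        · have hk' : pvLetter k ≠ "" := hiff.mp hk
          by_cases hm : (PySem.Dict.ofList ((d.get? k).getD [])).getD none [] ≠ []
          · simp [pvLoopA, pvEntryB, hk, hk', hm, List.append_assoc]
          · simp [pvLoopA, pvEntryB, hk, hk', hm, List.append_assoc]
        · have hk' : ¬ pvLetter k ≠ "" := fun h => hk (hiff.mpr h)
          have hlast : last = pvLetter k := (not_not.mp hk).symm
          by_cases hm : (PySem.Dict.ofList ((d.get? k).getD [])).getD none [] ≠ []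
          · simp [pvLoopA, pvEntryB, hk', hm, hlast, List.append_assoc]
          · simp [pvLoopA, pvEntryB, hk', hm, hlast, List.append_assoc]
      rw [hstep]
      have hsplit : t = t.takeWhile (fun x => pvLetter x == pvLetter k) ++
          t.dropWhile (fun x => pvLetter x == pvLetter k) := (List.takeWhile_append_dropWhile).symm
      rw [hsplit, pvLoopA_run d (pvLetter k) _ _ _
        (fun x hx => by simpa using List.mem_takeWhile_imp hx)]
      have hdrop_sub : (t.dropWhile (fun x => pvLetter x == pvLetter k)).Sublist t :=
        List.dropWhile_sublist _
      have hdrop_len : (t.dropWhile (fun x => pvLetter x == pvLetter k)).length ≤ m := by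
        have := hdrop_sub.length_le
        simp at hlen; omega
      have hpw' : (t.dropWhile (fun x => pvLetter x == pvLetter k)).Pairwise
          (fun a b => PySem.Str.lower a ≤ PySem.Str.lower b) :=
        (List.pairwise_cons.mp hpw).2.sublist hdrop_sub
      have hhead' : ∀ k0 ∈ (t.dropWhile (fun x => pvLetter x == pvLetter k)).head?,
          ((pvLetter k0 ≠ pvLetter k) ↔ (pvLetter k0 ≠ "")) := by
        intro a ha
        cases hdw : t.dropWhile (fun x => pvLetter x == pvLetter k) with
        | nil => rw [hdw] at ha; simp at ha
        | cons b t' =>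
          rw [hdw] at ha; simp at ha
          obtain rfl : b = a := ha
          have hne : pvLetter b ≠ pvLetter k := by
            have := pvDropWhile_head_false (fun x => pvLetter x == pvLetter k) t b t' hdw
            simpa using this
          refine ⟨fun _ hempty => ?_, fun _ => hne⟩
          have hat : b ∈ t := (List.dropWhile_sublist _).mem (by rw [hdw]; simp)
          have hle : PySem.Str.lower k ≤ PySem.Str.lower b :=
            (List.pairwise_cons.mp hpw).1 b hat
          have hae : b = "" := (pvLetter_eq_empty_iff b).mp hempty
          have hke : k = "" := pvLower_le_empty k (by rw [← hae]; exact hle)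
          exact hne (by rw [hae, hke])
      rw [ih _ hdrop_len _ (pvLetter k) hpw' hhead']
      conv_rhs => rw [pvRuns]
      simp [pvRenderRuns, List.append_assoc]

-- ---- bucket characterisation ----
theorem pvBuckets_keys (ks : List String) :
    (pvBuckets ks).keys = PySem.Set.ofList (ks.map pvLetter) := by
  rw [pvBuckets, PySem.Dict.keys_foldl_modify_key]
  rw [show (PySem.Dict.empty : PySem.Dict String (List String)).keys = [] from rfl]
  exact PySem.Set.update_nil_left _

theorem pvBuckets_getD (ks : List String) (L : String) :
    (pvBuckets ks).getD L [] = ks.filter (fun p => pvLetter p == L) := by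
  rw [pvBuckets,
    show ks.foldl (fun b p => PySem.Dict.modify b (pvLetter p) [] (fun v => v ++ [p]))
        PySem.Dict.empty =
      (ks.map (fun p => (pvLetter p, p))).foldl
        (fun b q => PySem.Dict.modify b q.1 [] (fun v => v ++ [q.2])) PySem.Dict.empty by
      rw [List.foldl_map],
    PySem.Dict.getD_foldl_modify_append]
  rw [show (PySem.Dict.empty : PySem.Dict String (List String)).getD L [] = [] from rfl,
    List.nil_append, List.filter_map]
  simp [Function.comp_def]

-- ---- B's nested loops as a flatMap over letter sections ----
theorem pvRenderRuns_eq_flatMap (d : PySem.Dict String (List (Option String × List Int))) :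
    ∀ rs, pvRenderRuns d rs = rs.flatMap (pvSect d) := by
  intro rs
  induction rs with
  | nil => rfl
  | cons r rs ih =>
    obtain ⟨l, g⟩ := r
    rw [pvRenderRuns, ih, List.flatMap_cons, pvSect, List.append_assoc]

-- ===== VERDICT (by name: the statement is the Claim_ definition above) =====
theorem render_index_md_spec : Claim_equal_render_index_md := by
  intro idx _
  unfold Spec_render_index_md render_index_md render_index_md_alt
  by_cases he : idx.isEmpty
  · simp [he]
  · simp only [he, Bool.false_eq_true, if_false]
    set d := PySem.Dict.ofList idx with hd
    set ks := PySem.Dict.keys d with hks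
    set S := PySem.List.sorted ks PySem.Str.lower false with hS
    have hpwS : S.Pairwise (fun a b => PySem.Str.lower a ≤ PySem.Str.lower b) :=
      PySem.List.sorted_pairwise _ _
    -- A side
    rw [pvMain d S.length S le_rfl _ "" hpwS (fun k0 _ => Iff.rfl)]
    -- B side: collapse the nested loops into a flatMap of sections
    have hinner : ∀ (acc : List String) (L : String),
        (PySem.List.sorted ((pvBuckets ks).getD L []) PySem.Str.lower false).foldl
          (fun ls p => ls ++ pvEntryB d p) (if L ≠ "" then acc ++ ["\n## " ++ L ++ "\n"] else acc)
        = acc ++ pvSect d (L, PySem.List.sorted ((pvBuckets ks).getD L []) PySem.Str.lower false) := by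
      intro acc L
      rw [PySem.List.foldl_append_eq_flatMap]
      by_cases hL : L ≠ "" <;> simp [pvSect, hL, List.append_assoc]
    have h1 := PySem.List.foldl_congr_mem
      (l := PySem.List.sorted (pvBuckets ks).keys PySem.Str.lower false)
      (init := ["# Index", ""])
      (f := fun acc L => (PySem.List.sorted ((pvBuckets ks).getD L []) PySem.Str.lower false).foldl
        (fun ls p => ls ++ pvEntryB d p) (if L ≠ "" then acc ++ ["\n## " ++ L ++ "\n"] else acc))
      (g := fun acc L => acc ++ pvSect d
        (L, PySem.List.sorted ((pvBuckets ks).getD L []) PySem.Str.lower false))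
      (fun acc L _ => hinner acc L)
    rw [h1, PySem.List.foldl_append_eq_flatMap]
    -- identify the letter list
    have hletters : PySem.List.sorted ((pvBuckets ks).keys) PySem.Str.lower false =
        PySem.List.dedup (S.map pvLetter) := by
      rw [pvBuckets_keys]
      apply PySem.List.sorted_eq_of_perm_of_pairwise_lt
      · apply (List.perm_ext_iff_of_nodup (PySem.Set.nodup_ofList _)
          (PySem.Set.nodup_ofList _)).mpr
        intro L
        rw [PySem.Set.mem_ofList, PySem.Set.mem_ofList]
        exact ((PySem.List.sorted_perm ks PySem.Str.lower false).map pvLetter).mem_iff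
      · exact pvDedup_letters_pairwise S.length S le_rfl hpwS
    rw [hletters]
    -- identify the buckets
    rw [pvRenderRuns_eq_flatMap, pvRuns_eq S.length S le_rfl hpwS, List.flatMap_map]
    have h2 : ∀ L : String, pvSect d (L, S.filter (fun p => pvLetter p == L)) =
        pvSect d (L, PySem.List.sorted ((pvBuckets ks).getD L []) PySem.Str.lower false) := by
      intro L
      rw [pvBuckets_getD, ← pvFilter_sorted]
    simp only [h2]
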